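-- pv_equiv track=rewrite | github.com/Protonk/sandbox-boostrap | book/evidence/experiments/profile-pipeline/encoder-write-trace/run_trace.py | _select_uuid
-- ===== SOURCE A (Python) =====
-- from typing import Any, Dict, List, Mapping, Optional
--
-- def _select_uuid(entries: List[Dict[str, str]], arch: str) -> Dict[str, Optional[str]]:
--     if not entries:
--         return {"uuid": None, "arch": None}
--     for entry in entries:
--         if entry.get("arch") == arch:
--             return {"uuid": entry.get("uuid"), "arch": arch}
--     if arch == "arm64":
--         for entry in entries:
--             if entry.get("arch") == "arm64e":
--                 return {"uuid": entry.get("uuid"), "arch": "arm64e"}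
--     if len(entries) == 1:
--         entry = entries[0]
--         return {"uuid": entry.get("uuid"), "arch": entry.get("arch")}
--     return {"uuid": None, "arch": None}
-- ===== SOURCE B (Python) =====
-- def _select_uuid(entries, arch):
--     # Single pass: rank every entry by preference (0 = exact arch match,
--     # 1 = arm64e fallback when arch is arm64, 3 = no match) and keep the
--     # first entry with the strictly best rank seen so far.
--     best_p, best_u = 3, None
--     for entry in entries:
--         a = entry.get("arch")
--         if a == arch:
--             p = 0
--         elif arch == "arm64" and a == "arm64e":
--             p = 1
--         else:
--             p = 3
--         if p < best_p:
--             best_p, best_u = p, entry.get("uuid")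
--     if best_p == 0:
--         return {"uuid": best_u, "arch": arch}
--     if best_p == 1:
--         return {"uuid": best_u, "arch": "arm64e"}
--     if len(entries) == 1:
--         e = entries[0]
--         return {"uuid": e.get("uuid"), "arch": e.get("arch")}
--     return {"uuid": None, "arch": None}
-- ===== Notes on version B (the rewrite author's own statement) =====
-- stated objective: alternative
-- what changed: Replaces A's staged scans (exact-match scan, then a second arm64e-fallback scan) with a single selection pass that ranks each entry by a preference score and keeps the first entry of strictly best rank, deciding the answer from the final rank.
import Mathlib
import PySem

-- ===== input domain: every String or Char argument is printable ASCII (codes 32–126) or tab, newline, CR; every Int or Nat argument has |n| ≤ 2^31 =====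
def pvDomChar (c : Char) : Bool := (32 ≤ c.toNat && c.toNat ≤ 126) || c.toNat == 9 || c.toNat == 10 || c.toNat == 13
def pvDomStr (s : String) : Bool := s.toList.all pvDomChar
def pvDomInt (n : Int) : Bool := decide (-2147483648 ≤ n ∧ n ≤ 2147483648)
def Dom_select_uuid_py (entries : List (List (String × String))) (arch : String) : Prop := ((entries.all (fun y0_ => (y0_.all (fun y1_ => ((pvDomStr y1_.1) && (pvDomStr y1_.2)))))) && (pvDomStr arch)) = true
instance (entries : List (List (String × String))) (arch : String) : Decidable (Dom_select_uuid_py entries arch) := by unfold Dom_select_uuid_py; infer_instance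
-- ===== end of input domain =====

-- ===== PORT A =====
-- B replaces A's staged scans with one rank-and-select pass (objective: alternative).
-- first-match lookup of key k in an entry dict (Python entry.get(k))
def dget (e : List (String × String)) (k : String) : Option String :=
  (e.find? (fun p => p.1 == k)).map (fun p => p.2)

def select_uuid_py (entries : List (List (String × String))) (arch : String) : List (String × Option String) :=
  if entries.isEmpty then [("uuid", none), ("arch", none)]
  else
    match entries.find? (fun e => dget e "arch" == some arch) with
    | some e => [("uuid", dget e "uuid"), ("arch", some arch)]
    | none =>
      match (if arch == "arm64" then entries.find? (fun e => dget e "arch" == some "arm64e") else none) with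
      | some e => [("uuid", dget e "uuid"), ("arch", some "arm64e")]
      | none =>
        if entries.length == 1 then
          match entries with
          | e :: _ => [("uuid", dget e "uuid"), ("arch", dget e "arch")]
          | [] => [("uuid", none), ("arch", none)]  -- unreachable (entries nonempty here)
        else [("uuid", none), ("arch", none)]

-- ===== PORT B =====
-- rank of one entry: 0 exact match, 1 arm64e fallback, 3 otherwise
def rankOf (arch : String) (e : List (String × String)) : Nat :=
  if dget e "arch" == some arch then 0
  else if arch == "arm64" && dget e "arch" == some "arm64e" then 1
  else 3

-- one step of B's selection loop: keep the first entry of strictly best rank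
def rankStep (arch : String) (st : Nat × Option String) (e : List (String × String)) : Nat × Option String :=
  if rankOf arch e < st.1 then (rankOf arch e, dget e "uuid") else st

def select_uuid_py_alt (entries : List (List (String × String))) (arch : String) : List (String × Option String) :=
  let st := entries.foldl (rankStep arch) (3, none)
  if st.1 == 0 then [("uuid", st.2), ("arch", some arch)]
  else if st.1 == 1 then [("uuid", st.2), ("arch", some "arm64e")]
  else if entries.length == 1 then
    match entries with
    | e :: _ => [("uuid", dget e "uuid"), ("arch", dget e "arch")]
    | [] => [("uuid", none), ("arch", none)]
  else [("uuid", none), ("arch", none)]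

-- ===== PRECONDITION & SPEC =====
def Spec_select_uuid_py (entries : List (List (String × String))) (arch : String) (out : List (String × Option String)) : Prop := out = select_uuid_py_alt entries arch
instance (entries : List (List (String × String))) (arch : String) (out : List (String × Option String)) : Decidable (Spec_select_uuid_py entries arch out) := by unfold Spec_select_uuid_py; infer_instance

-- ===== CLAIM (what is proved, stated in full; the proofs are below) =====
def Claim_equal_select_uuid_py : Prop := ∀ (entries : List (List (String × String))) (arch : String), Dom_select_uuid_py entries arch → Spec_select_uuid_py entries arch (select_uuid_py entries arch)

-- ===== LEMMAS AND PROOFS =====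

-- once rank 0 is reached the state is final
theorem foldl_rank0 (arch : String) (u : Option String) :
    ∀ (entries : List (List (String × String))),
    entries.foldl (rankStep arch) (0, u) = (0, u) := by
  intro entries
  induction entries with
  | nil => rfl
  | cons e rest ih => simp [List.foldl_cons, rankStep, ih]

-- from rank 1 the state only changes at the first exact match
theorem foldl_rank1 (arch : String) (u : Option String) :
    ∀ (entries : List (List (String × String))),
    entries.foldl (rankStep arch) (1, u) =
      match entries.find? (fun e => dget e "arch" == some arch) with
      | some e => (0, dget e "uuid")
      | none => (1, u) := by
  intro entries
  induction entries with
  | nil => rfl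
  | cons e rest ih =>
    simp only [List.foldl_cons, List.find?_cons]
    by_cases h : dget e "arch" == some arch
    · simp [h, rankStep, rankOf, foldl_rank0]
    · have hr : rankOf arch e = 1 ∨ rankOf arch e = 3 := by
        unfold rankOf; split_ifs with a b <;> simp_all
      have : rankStep arch (1, u) e = (1, u) := by
        unfold rankStep; rcases hr with h' | h' <;> simp [h']
      rw [this, ih]
      simp [h]

-- the full characterisation of B's selection pass from the initial state
theorem foldl_rank3 (arch : String) :
    ∀ (entries : List (List (String × String))),
    entries.foldl (rankStep arch) (3, none) =
      match entries.find? (fun e => dget e "arch" == some arch) with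
      | some e => (0, dget e "uuid")
      | none =>
        if arch == "arm64" then
          match entries.find? (fun e => dget e "arch" == some "arm64e") with
          | some e => (1, dget e "uuid")
          | none => (3, none)
        else (3, none) := by
  intro entries
  induction entries with
  | nil => by_cases h : arch == "arm64" <;> simp [h]
  | cons e rest ih =>
    simp only [List.foldl_cons, List.find?_cons]
    by_cases h0 : dget e "arch" == some arch
    · simp [h0, rankStep, rankOf, foldl_rank0]
    · by_cases h1 : arch == "arm64" && dget e "arch" == some "arm64e"
      · have harch : arch = "arm64" := by
          have := (Bool.and_eq_true _ _).mp h1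
          exact beq_iff_eq.mp this.1
        have he : dget e "arch" == some "arm64e" := ((Bool.and_eq_true _ _).mp h1).2
        have : rankStep arch (3, none) e = (1, dget e "uuid") := by
          simp [rankStep, rankOf, h0, h1]
        rw [this, foldl_rank1]
        subst harch
        cases hf : rest.find? (fun e => dget e "arch" == some "arm64") with
        | some e' => simp [h0, hf, he]
        | none => simp [h0, hf, he]
      · have : rankStep arch (3, none) e = (3, none) := by
          simp [rankStep, rankOf, h0, h1]
        rw [this, ih]
        simp only [h0]
        by_cases ha : arch == "arm64"
        · have he' : (dget e "arch" == some "arm64e") = false := by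
            cases hx : dget e "arch" == some "arm64e"
            · rfl
            · exact absurd (by simp [ha, hx]) h1
          simp [ha, he']
        · simp [ha]

-- ===== VERDICT (by name: the statement is the Claim_ definition above) =====
theorem select_uuid_py_spec : Claim_equal_select_uuid_py := by
  intro entries arch _
  unfold Spec_select_uuid_py select_uuid_py select_uuid_py_alt
  rw [foldl_rank3]
  cases entries with
  | nil => simp
  | cons e0 rest =>
    simp only [List.isEmpty_cons, Bool.false_eq_true, if_false]
    cases h1 : (e0 :: rest).find? (fun e => dget e "arch" == some arch) with
    | some e => simp [h1]
    | none =>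
      simp only [h1]
      by_cases ha : arch == "arm64"
      · simp only [ha, if_true]
        cases h2 : (e0 :: rest).find? (fun e => dget e "arch" == some "arm64e") with
        | some e => simp [h2]
        | none => simp [h2]
      · simp [ha]
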